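-- pv_equiv track=rewrite | github.com/pagabuc/kernographer | run_clang.py | clangify_entry
-- ===== SOURCE A (Python) =====
-- def clangify_entry(entry, unknown=None):
--     args = ['clang-struct'] + entry['arguments'][1:]
--
--     if unknown is not None:
--         args = [a for a in args if a not in unknown]
--
--     if "-o" in args:
--         i = args.index("-o")
--         args = args[:i] + args[i+2:]
--
--     return args
-- ===== SOURCE B (Python) =====
-- def clangify_entry(entry, unknown=None):
--     out = []
--     removed = False
--     skip_next = False
--     for a in ['clang-struct'] + entry['arguments'][1:]:
--         if unknown is not None and a in unknown:
--             continue
--         if not removed and a == "-o":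
--             removed = True
--             skip_next = True
--             continue
--         if skip_next:
--             skip_next = False
--             continue
--         out.append(a)
--     return out
-- ===== Notes on version B (the rewrite author's own statement) =====
-- stated objective: alternative
-- what changed: Replaces A's three passes (comprehension filter, membership test + index, two slice copies) by a single traversal with an output accumulator and removed/skip_next flags that drops unknown flags and the first surviving '-o' plus its argument in one pass.
-- outside the precondition, e.g. on clangify_entry({}, None): A raises KeyError, B raises KeyError
import Mathlib
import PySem

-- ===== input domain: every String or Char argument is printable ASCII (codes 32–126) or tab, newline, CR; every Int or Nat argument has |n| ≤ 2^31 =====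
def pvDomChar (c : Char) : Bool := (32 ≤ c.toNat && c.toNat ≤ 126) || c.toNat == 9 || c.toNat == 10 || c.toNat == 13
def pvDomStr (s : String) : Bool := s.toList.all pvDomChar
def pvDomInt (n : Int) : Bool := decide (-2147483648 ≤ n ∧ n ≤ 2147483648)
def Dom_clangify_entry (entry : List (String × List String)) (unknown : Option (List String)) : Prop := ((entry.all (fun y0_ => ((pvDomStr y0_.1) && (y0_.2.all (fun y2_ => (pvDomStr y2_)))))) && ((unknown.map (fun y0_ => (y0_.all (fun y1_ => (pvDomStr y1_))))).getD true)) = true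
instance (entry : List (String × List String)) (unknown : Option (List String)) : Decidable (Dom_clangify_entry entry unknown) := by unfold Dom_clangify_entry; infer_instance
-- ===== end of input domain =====

-- B fuses A's filter comprehension and the index/slice removal of the first "-o" pair into one
-- accumulator pass with removed/skip_next flags (objective: alternative decomposition, same cost).

-- ===== PORT A =====
-- entry['arguments'] raises KeyError when absent: that is excluded by Pre_ below; the [] here is dead under Pre_.
def clangify_entry (entry : List (String × List String)) (unknown : Option (List String)) : List String :=
  match (PySem.Dict.mk entry).get? "arguments" with
  | none => []
  | some arguments =>
    let args := ["clang-struct"] ++ PySem.List.slice arguments (some 1) none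
    let args := match unknown with
      | none => args
      | some u => args.filter (fun a => !(u.contains a))
    if args.contains "-o" then
      match PySem.List.index? args "-o" with
      | some i => PySem.List.slice args none (some (i : Int)) ++ PySem.List.slice args (some ((i : Int) + 2)) none
      | none => args
    else args

-- ===== PORT B =====
-- the loop body of Source B: removed / skip_next flags, output accumulated by cons
def altGo (unknown : Option (List String)) : List String → Bool → Bool → List String
  | [], _, _ => []
  | a :: rest, removed, skip =>
    if (match unknown with | some u => u.contains a | none => false) then
      altGo unknown rest removed skip
    else if !removed && a == "-o" then
      altGo unknown rest true true
    else if skip then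
      altGo unknown rest removed false
    else
      a :: altGo unknown rest removed skip

def clangify_entry_alt (entry : List (String × List String)) (unknown : Option (List String)) : List String :=
  match (PySem.Dict.mk entry).get? "arguments" with
  | none => []
  | some arguments =>
    altGo unknown (["clang-struct"] ++ PySem.List.slice arguments (some 1) none) false false

-- ===== PRECONDITION & SPEC =====
-- Pre_ excludes exactly the entries without an 'arguments' key, on which A raises KeyError.
def Pre_clangify_entry (entry : List (String × List String)) (_unknown : Option (List String)) : Prop :=
  ((PySem.Dict.mk entry).get? "arguments").isSome = true

instance (entry : List (String × List String)) (unknown : Option (List String)) : Decidable (Pre_clangify_entry entry unknown) := by unfold Pre_clangify_entry; infer_instance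

def pvWitness_clangify_entry : (List (String × List String)) × Option (List String) :=
  ([("arguments", ["gcc", "-c", "x.c", "-o", "x.o"])], some ["-g"])

def Spec_clangify_entry (entry : List (String × List String)) (unknown : Option (List String)) (out : List String) : Prop := out = clangify_entry_alt entry unknown
instance (entry : List (String × List String)) (unknown : Option (List String)) (out : List String) : Decidable (Spec_clangify_entry entry unknown out) := by unfold Spec_clangify_entry; infer_instance

-- ===== CLAIM (what is proved, stated in full; the proofs are below) =====
def Claim_equal_clangify_entry : Prop := ∀ (entry : List (String × List String)) (unknown : Option (List String)), Dom_clangify_entry entry unknown → Pre_clangify_entry entry unknown → Spec_clangify_entry entry unknown (clangify_entry entry unknown)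

-- ===== LEMMAS AND PROOFS =====

-- the surviving elements: those not filtered out by `unknown`
def keepP (unknown : Option (List String)) (a : String) : Bool :=
  !(match unknown with | some u => u.contains a | none => false)

-- A's result after the filter stage, characterised structurally
def dropO : List String → List String
  | [] => []
  | a :: rest => if a = "-o" then rest.tail else a :: dropO rest

theorem altGo_copy (u : Option (List String)) (xs : List String) :
    altGo u xs true false = xs.filter (keepP u) := by
  induction xs with
  | nil => rfl
  | cons a rest ih =>
    simp only [altGo, keepP, List.filter]
    cases h : (match u with | some us => us.contains a | none => false)
    · simp [ih]
    · simp [h, ih]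

theorem altGo_skip (u : Option (List String)) (xs : List String) :
    altGo u xs true true = (xs.filter (keepP u)).tail := by
  induction xs with
  | nil => rfl
  | cons a rest ih =>
    simp only [altGo, keepP, List.filter]
    cases h : (match u with | some us => us.contains a | none => false)
    · simp [altGo_copy]
    · simp [h, ih]

theorem altGo_main (u : Option (List String)) (xs : List String) :
    altGo u xs false false = dropO (xs.filter (keepP u)) := by
  induction xs with
  | nil => rfl
  | cons a rest ih =>
    simp only [altGo, keepP, List.filter]
    cases h : (match u with | some us => us.contains a | none => false)
    · by_cases ho : a = "-o"
      · subst ho; simp [altGo_skip, dropO]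
      · simp [ho, ih, dropO]
    · simp [h, ih]

theorem dropO_not_mem (ys : List String) (h : "-o" ∉ ys) : dropO ys = ys := by
  induction ys with
  | nil => rfl
  | cons a rest ih =>
    simp only [List.mem_cons, not_or] at h
    simp [dropO, Ne.symm h.1, ih h.2]

theorem dropO_index (ys : List String) (i : Nat) (h : PySem.List.index? ys "-o" = some i) :
    dropO ys = ys.take i ++ ys.drop (i + 2) := by
  induction ys generalizing i with
  | nil => simp [PySem.List.index?_eq_idxOf?] at h
  | cons a rest ih =>
    by_cases ho : a = "-o"
    · subst ho
      rw [PySem.List.index?_cons_self] at h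
      cases h
      simp [dropO, List.drop_one]
    · rw [PySem.List.index?_cons_of_ne rest ho] at h
      rcases Option.map_eq_some_iff.mp h with ⟨j, hj, rfl⟩
      simp [dropO, ho, ih j hj, List.take_succ_cons]

theorem clangify_filter_eq (u : Option (List String)) (args : List String) :
    (match u with
      | none => args
      | some us => args.filter (fun a => !(us.contains a))) = args.filter (keepP u) := by
  cases u with
  | none => exact (List.filter_eq_self.mpr (fun a _ => rfl)).symm
  | some us => rfl

-- ===== VERDICT (by name: the statement is the Claim_ definition above) =====
theorem clangify_entry_spec : Claim_equal_clangify_entry := by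
  intro entry unknown _ hpre
  unfold Spec_clangify_entry clangify_entry clangify_entry_alt
  cases hget : (PySem.Dict.mk entry).get? "arguments" with
  | none => rfl
  | some arguments =>
    simp only
    rw [clangify_filter_eq, altGo_main]
    set ys := (["clang-struct"] ++ PySem.List.slice arguments (some 1) none).filter (keepP unknown) with hys
    by_cases hmem : "-o" ∈ ys
    · have hcon : ys.contains "-o" = true := by simpa using hmem
      rw [hcon]
      simp only [if_true]
      rcases Option.isSome_iff_exists.mp ((PySem.List.index?_isSome_iff ys "-o").mpr hmem) with ⟨i, hi⟩
      rw [hi]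
      show PySem.List.slice ys none (some (i : Int)) ++ PySem.List.slice ys (some ((i : Int) + 2)) none = dropO ys
      rw [PySem.List.slice_to_natCast]
      have h2 : ((i : Int) + 2) = ((i + 2 : Nat) : Int) := by push_cast; ring
      rw [h2, PySem.List.slice_from_natCast]
      exact (dropO_index ys i hi).symm
    · have hcon : ys.contains "-o" = false := by simpa using hmem
      rw [hcon]
      simp only [if_false, Bool.false_eq_true]
      exact (dropO_not_mem ys hmem).symm
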